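-- pv_equiv track=rewrite | github.com/miliar/Code_Jam_Webscraper | Solutions_python/Problem_213/68.py | solve
-- ===== SOURCE A (Python) =====
-- import collections
--
-- def solve(N, C, G):
--     if N == 1:
--         return len(G)
--     B = collections.Counter([g[0] for g in G])
--     A = collections.Counter([g[1] for g in G])
--     cum = 0
--     mc = A.most_common(1)[0][1]
--     for i in range(1, N+1):
--         cum+=B[i]
--         mc=max(mc, (cum+i-1)//i)
--     prom = 0
--     for i in range(1, N+1):
--         prom+=max(0, B[i]-mc)
--     return str(mc) + ' ' + str(prom)
-- ===== SOURCE B (Python) =====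
-- import collections
--
-- def solve(N, C, G):
--     if N == 1:
--         return len(G)
--     mc = collections.Counter([g[1] for g in G]).most_common(1)[0][1]
--     xs = sorted(g[0] for g in G if 1 <= g[0] <= N)
--     for j, x in enumerate(xs):
--         mc = max(mc, j // x + 1)
--     prev = None
--     run = 0
--     prom = 0
--     for x in xs:
--         run = run + 1 if x == prev else 1
--         prev = x
--         if run > mc:
--             prom += 1
--     return str(mc) + ' ' + str(prom)
-- ===== Notes on version B (the rewrite author's own statement) =====
-- stated objective: alternative
-- what changed: B drops A's Counter of first coordinates and its two O(N) range scans entirely: it sorts the in-range first coordinates and derives the capacity from each element's sorted index (mc = max over j of j//xs[j]+1, no prefix-sum accumulator and no per-i count lookups), then counts promotions with a single run-length scan over the sorted list instead of summing max(0,B[i]-mc) over 1..N; its work no longer depends on N.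
-- outside the precondition, e.g. on solve(1, 0, [[1, 2]]): A returns 1, B returns 1
import Mathlib
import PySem

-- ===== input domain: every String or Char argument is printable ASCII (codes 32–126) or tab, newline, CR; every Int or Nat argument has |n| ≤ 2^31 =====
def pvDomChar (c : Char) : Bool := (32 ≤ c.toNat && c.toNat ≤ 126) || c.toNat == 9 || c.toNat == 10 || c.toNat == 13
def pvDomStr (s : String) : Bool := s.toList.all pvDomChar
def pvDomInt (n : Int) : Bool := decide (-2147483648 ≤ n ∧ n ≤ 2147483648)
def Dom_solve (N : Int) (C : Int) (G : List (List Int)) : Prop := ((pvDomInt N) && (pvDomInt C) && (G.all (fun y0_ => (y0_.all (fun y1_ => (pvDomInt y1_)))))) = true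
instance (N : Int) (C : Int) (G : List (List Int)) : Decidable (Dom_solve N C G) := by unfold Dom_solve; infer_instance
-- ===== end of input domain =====

-- B sorts the in-range first coordinates once and reads the capacity off each element's sorted
-- index (j // x + 1), then counts promotions by a run-length scan, instead of A's Counter plus
-- two scans over range(1, N+1); return value only (neither version mutates its arguments).

-- Counter.most_common(1)[0][1]: count of the first item after a stable sort by count, descending
-- (both Pythons call this same library routine; [0] on an empty counter is excluded by Pre_solve,
-- the total port reads a default there).
def pvMostCommonTopCount (d : PySem.Dict Int Int) : Int :=
  (PySem.List.pyGetD ((PySem.List.sorted d.items (fun p => p.2) true).take 1) 0 (0, 0)).2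

-- ===== PORT A =====
def solve (N : Int) (C : Int) (G : List (List Int)) : String :=
  if N = 1 then PySem.Int.toStr G.length
  else
    let B := PySem.Dict.counter (G.map (fun g => PySem.List.pyGetD g 0 0))
    let A := PySem.Dict.counter (G.map (fun g => PySem.List.pyGetD g 1 0))
    let mc0 := pvMostCommonTopCount A
    let st := (PySem.List.pyRange 1 (N + 1) 1).foldl
      (fun (s : Int × Int) i =>
        (s.1 + B.getD i 0, max s.2 (PySem.Int.floordiv (s.1 + B.getD i 0 + i - 1) i)))
      (0, mc0)
    let prom := (PySem.List.pyRange 1 (N + 1) 1).foldl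
      (fun p i => p + max 0 (B.getD i 0 - st.2)) 0
    PySem.Int.toStr st.2 ++ " " ++ PySem.Int.toStr prom

-- ===== PORT B =====
def solve_alt (N : Int) (C : Int) (G : List (List Int)) : String :=
  if N = 1 then PySem.Int.toStr G.length
  else
    let mc0 := pvMostCommonTopCount
      (PySem.Dict.counter (G.map (fun g => PySem.List.pyGetD g 1 0)))
    let xs := PySem.List.sorted
      ((G.map (fun g => PySem.List.pyGetD g 0 0)).filter
        (fun x => decide (1 ≤ x) && decide (x ≤ N)))
      (fun x => x) false
    let mc := (PySem.List.enumerate xs 0).foldl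
      (fun m p => max m (PySem.Int.floordiv p.1 p.2 + 1)) mc0
    let st := xs.foldl
      (fun (s : Option Int × Int × Int) x =>
        let run := if some x == s.1 then s.2.1 + 1 else 1
        (some x, run, if mc < run then s.2.2 + 1 else s.2.2))
      (none, 0, 0)
    PySem.Int.toStr mc ++ " " ++ PySem.Int.toStr st.2.2

-- ===== PRECONDITION & SPEC =====
-- Pre_ excludes: N = 1, where A returns the int len(G) rather than a string (not a value of the
-- declared return type); G = [], where A.most_common(1)[0] raises IndexError; and rows with
-- fewer than 2 entries, where g[0] / g[1] raises IndexError.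
def Pre_solve (N : Int) (C : Int) (G : List (List Int)) : Prop :=
  N ≠ 1 ∧ G ≠ [] ∧ ∀ g ∈ G, 2 ≤ g.length
instance (N : Int) (C : Int) (G : List (List Int)) : Decidable (Pre_solve N C G) := by
  unfold Pre_solve; infer_instance

def pvWitness_solve : Int × Int × List (List Int) := (2, 0, [[1, 2], [1, 1]])

def Spec_solve (N : Int) (C : Int) (G : List (List Int)) (out : String) : Prop :=
  out = solve_alt N C G
instance (N : Int) (C : Int) (G : List (List Int)) (out : String) : Decidable (Spec_solve N C G out) := by
  unfold Spec_solve; infer_instance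

-- ===== CLAIM (what is proved, stated in full; the proofs are below) =====
def Claim_equal_solve : Prop := ∀ (N : Int) (C : Int) (G : List (List Int)),
  Dom_solve N C G → Pre_solve N C G → Spec_solve N C G (solve N C G)

-- ===== LEMMAS AND PROOFS =====

-- prefix sum of cnt over 1..i
def pvS (cnt : Int → Int) (i : Int) : Int := ((PySem.List.pyRange 1 (i + 1) 1).map cnt).sum

lemma pvS_succ (cnt : Int → Int) (n : Nat) :
    pvS cnt ((n : Int) + 1) = pvS cnt n + cnt ((n : Int) + 1) := by
  unfold pvS
  rw [show ((n : Int) + 1 + 1) = ((n : Int) + 1) + 1 by ring,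
    PySem.List.pyRange_one_succ_right (by omega)]
  simp

-- running max: bounds
lemma pv_foldl_max_le (l : List Int) (a c : Int) (ha : a ≤ c) (hl : ∀ y ∈ l, y ≤ c) :
    l.foldl max a ≤ c := by
  induction l generalizing a with
  | nil => exact ha
  | cons x t ih =>
    exact ih (max a x) (max_le ha (hl x (by simp))) (fun y hy => hl y (by simp [hy]))

lemma pv_le_foldl_max_seed (l : List Int) (a : Int) : a ≤ l.foldl max a :=
  (PySem.List.le_foldl_max l a).1

lemma pv_le_foldl_max_mem (l : List Int) (a y : Int) (hy : y ∈ l) : y ≤ l.foldl max a :=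
  (PySem.List.le_foldl_max l a).2 y hy

lemma pv_foldl_max_map {α : Type} (l : List α) (g : α → Int) (a : Int) :
    l.foldl (fun m x => max m (g x)) a = (l.map g).foldl max a := by
  induction l generalizing a with
  | nil => rfl
  | cons x t ih => simp [ih]

-- ceiling division (c+i-1)//i facts
lemma pv_ceil_zero (i : Int) (hi : 1 ≤ i) : PySem.Int.floordiv (0 + i - 1) i = 0 := by
  rw [PySem.Int.floordiv_eq_iff_of_pos (by omega)]
  constructor <;> nlinarith

lemma pv_ceil_mono (c k i : Int) (hc : 0 ≤ c) (hk : 1 ≤ k) (hki : k ≤ i) :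
    PySem.Int.floordiv (c + i - 1) i ≤ PySem.Int.floordiv (c + k - 1) k := by
  set q := PySem.Int.floordiv (c + k - 1) k with hq
  have hbr := (PySem.Int.floordiv_eq_iff_of_pos (a := c + k - 1) (b := k) (q := q)
    (by omega)).1 hq.symm
  have hqk : c ≤ q * k := by nlinarith [hbr.1, hbr.2]
  have hq0 : 0 ≤ q := by nlinarith [hbr.2]
  have hqi : c ≤ q * i := le_trans hqk (by nlinarith)
  have : PySem.Int.floordiv (c + i - 1) i < q + 1 := by
    rw [PySem.Int.floordiv_lt_iff_lt_mul (by omega)]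
    nlinarith
  omega

lemma pv_ceil_mono_num (a b x : Int) (hx : 1 ≤ x) (hab : a ≤ b) :
    PySem.Int.floordiv (a + x - 1) x ≤ PySem.Int.floordiv (b + x - 1) x := by
  set q := PySem.Int.floordiv (b + x - 1) x with hq
  have hbr := (PySem.Int.floordiv_eq_iff_of_pos (a := b + x - 1) (b := x) (q := q)
    (by omega)).1 hq.symm
  have : PySem.Int.floordiv (a + x - 1) x < q + 1 := by
    rw [PySem.Int.floordiv_lt_iff_lt_mul (by omega)]
    nlinarith [hbr.2]
  omega

-- j // x + 1 = ceil((j+1)/x)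
lemma pv_floordiv_add_one (j x : Int) (hx : 1 ≤ x) :
    PySem.Int.floordiv j x + 1 = PySem.Int.floordiv ((j + 1) + x - 1) x := by
  set q := PySem.Int.floordiv j x with hq
  have hbr := (PySem.Int.floordiv_eq_iff_of_pos (a := j) (b := x) (q := q) (by omega)).1 hq.symm
  rw [show (j + 1) + x - 1 = j + x by ring]
  rw [eq_comm, PySem.Int.floordiv_eq_iff_of_pos (by omega)]
  constructor <;> nlinarith [hbr.1, hbr.2]

-- closed form of A's range loop
lemma pv_foldA (cnt : Int → Int) (m0 : Int) (n : Nat) :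
    (PySem.List.pyRange 1 ((n : Int) + 1) 1).foldl
      (fun (s : Int × Int) i =>
        (s.1 + cnt i, max s.2 (PySem.Int.floordiv (s.1 + cnt i + i - 1) i)))
      (0, m0)
    = (pvS cnt n,
       ((PySem.List.pyRange 1 ((n : Int) + 1) 1).map
         (fun i => PySem.Int.floordiv (pvS cnt i + i - 1) i)).foldl max m0) := by
  induction n with
  | zero =>
    rw [PySem.List.pyRange_one_eq_nil (by norm_num)]
    simp [pvS, PySem.List.pyRange_one_eq_nil]
  | succ n ih =>
    rw [show (((n + 1 : Nat) : Int) + 1) = ((n : Int) + 1) + 1 by push_cast; ring,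
      PySem.List.pyRange_one_succ_right (by omega)]
    rw [List.foldl_append, List.map_append, List.foldl_append, ih]
    simp only [List.foldl_cons, List.foldl_nil, List.map_cons, List.map_nil]
    rw [show ((n + 1 : Nat) : Int) = ((n : Int) + 1) by push_cast; ring, pvS_succ]

-- sum over a list where terms vanish off the filter
lemma pv_sum_filter (l : List Int) (p : Int → Bool) (f : Int → Int)
    (h : ∀ x ∈ l, p x = false → f x = 0) :
    (l.map f).sum = ((l.filter p).map f).sum := by
  induction l with
  | nil => rfl
  | cons x t ih =>
    simp only [List.map_cons, List.sum_cons, List.filter_cons]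
    by_cases hp : p x = true
    · rw [if_pos hp]; simp only [List.map_cons, List.sum_cons]
      rw [ih (fun y hy => h y (by simp [hy]))]
    · rw [if_neg hp, h x (by simp) (by simpa using hp), zero_add,
        ih (fun y hy => h y (by simp [hy]))]

-- m0 = most_common(1)[0][1] of a counter of a nonempty list is a count, hence nonnegative
lemma pv_m0_nonneg (ys : List Int) (hys : ys ≠ []) :
    0 ≤ pvMostCommonTopCount (PySem.Dict.counter ys) := by
  unfold pvMostCommonTopCount
  have hitems : (PySem.Dict.counter ys).items ≠ [] := by
    rw [PySem.Dict.items_counter]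
    simp only [ne_eq, List.map_eq_nil_iff]
    intro h
    rcases List.exists_mem_of_ne_nil ys hys with ⟨y, hy⟩
    have := (PySem.Set.mem_ofList ys y).2 hy
    simp [h] at this
  have hs : PySem.List.sorted (PySem.Dict.counter ys).items (fun p => p.2) true ≠ [] := by
    rw [ne_eq, PySem.List.sorted_eq_nil_iff]
    exact hitems
  rcases hL : PySem.List.sorted (PySem.Dict.counter ys).items (fun p => p.2) true with _ | ⟨p, t⟩
  · exact absurd hL hs
  · have hpmem : p ∈ (PySem.Dict.counter ys).items := by
      rw [← PySem.List.mem_sorted _ (fun p => p.2) true, hL]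
      simp
    rw [PySem.Dict.items_counter] at hpmem
    rcases List.mem_map.1 hpmem with ⟨k, _, rfl⟩
    simp [PySem.List.pyGetD_zero_cons]

-- run-length promotion spec: per distinct value, max(0, count - mc)
def pvPromSpec (mc : Int) : List Int → Int
  | [] => 0
  | x :: t =>
      max 0 (((x :: t).count x : Int) - mc) + pvPromSpec mc (t.filter (fun y => decide (y ≠ x)))
termination_by l => l.length
decreasing_by
  simp only [List.length_cons, List.length_unattach]
  exact Nat.lt_succ_of_le (le_trans (List.length_filter_le _ _) (by simp))

-- the sorted in-range first coordinates (proof-side name for the list B builds)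
def pvXs (N : Int) (L : List Int) : List Int :=
  PySem.List.sorted (L.filter (fun x => decide (1 ≤ x) && decide (x ≤ N))) (fun x => x) false

-- the run-length step of B's promotion loop (proof-side name for the port's lambda)
def pvRunStep (mc : Int) (s : Option Int × Int × Int) (x : Int) : Option Int × Int × Int :=
  (some x, if some x == s.1 then s.2.1 + 1 else 1,
   if mc < (if some x == s.1 then s.2.1 + 1 else 1) then s.2.2 + 1 else s.2.2)

lemma pvXs_sorted (N : Int) (L : List Int) : (pvXs N L).Pairwise (· ≤ ·) := by
  simpa using PySem.List.sorted_pairwise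
    (L.filter (fun x => decide (1 ≤ x) && decide (x ≤ N))) (fun x => x)

lemma pvXs_mem (N : Int) (L : List Int) (x : Int) :
    x ∈ pvXs N L ↔ (x ∈ L ∧ 1 ≤ x ∧ x ≤ N) := by
  unfold pvXs
  rw [PySem.List.mem_sorted, List.mem_filter]
  simp

lemma pvXs_nil (N : Int) (L : List Int) (hN : N < 1) : pvXs N L = [] := by
  unfold pvXs
  rw [PySem.List.sorted_eq_nil_iff]
  exact List.filter_eq_nil_iff.2 (fun x _ => by simp; omega)

-- 0/1 indicator summed over a duplicate-free list
lemma pv_sum_indicator (R : List Int) (a : Int) (hR : R.Nodup) :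
    (R.map (fun j => if j = a then (1 : Int) else 0)).sum = if a ∈ R then (1 : Int) else 0 := by
  induction R with
  | nil => simp
  | cons r R ihR =>
    have hR' : R.Nodup := hR.of_cons
    by_cases hra : r = a
    · subst hra
      have hnot : r ∉ R := (List.nodup_cons.1 hR).1
      simp [ihR hR', hnot]
    · simp [hra, ihR hR', Ne.symm hra]

-- sum over a nodup list of per-value counts is a countP
lemma pv_count_range_sum (L R : List Int) (hR : R.Nodup) :
    (R.map (fun j => (L.count j : Int))).sum = (L.countP (fun x => decide (x ∈ R)) : Int) := by
  induction L with
  | nil => simp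
  | cons a L ih =>
    have hmap : R.map (fun j => ((a :: L).count j : Int))
        = R.map (fun j => (L.count j : Int) + (if j = a then (1 : Int) else 0)) := by
      apply List.map_congr_left
      intro j _
      by_cases hja : j = a
      · subst hja; simp [List.count_cons_self]
      · simp [List.count_cons, hja]
        omega
    rw [hmap, List.sum_map_add, ih, pv_sum_indicator R a hR]
    by_cases ha : a ∈ R <;> simp [ha]

-- A's prefix sum equals the countP of the sorted filtered list
lemma pv_pvS_eq (N : Int) (L : List Int) (i : Int) (h0 : 0 ≤ i) (hN : i ≤ N) :
    pvS (fun j => (L.count j : Int)) i = ((pvXs N L).countP (fun y => decide (y ≤ i)) : Int) := by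
  unfold pvS pvXs
  rw [pv_count_range_sum L _ (PySem.List.nodup_pyRange_one 1 (i + 1))]
  have h1 : L.countP (fun x => decide (x ∈ PySem.List.pyRange 1 (i + 1) 1))
      = L.countP (fun x => decide (1 ≤ x) && decide (x ≤ i)) := by
    apply List.countP_congr
    intro x _
    simp [PySem.List.mem_pyRange_one]
  have h2 : (PySem.List.sorted (L.filter (fun x => decide (1 ≤ x) && decide (x ≤ N)))
        (fun x => x) false).countP (fun y => decide (y ≤ i))
      = (L.filter (fun x => decide (1 ≤ x) && decide (x ≤ N))).countP
          (fun y => decide (y ≤ i)) :=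
    (PySem.List.sorted_perm _ _ _).countP_eq _
  rw [h1, h2, List.countP_filter]
  congr 1
  apply List.countP_congr
  intro x _
  simp
  omega

-- in a nondecreasing list, at least j+1 elements are ≤ the element at index j
lemma pv_idx_le_countP (xs : List Int) (hs : xs.Pairwise (· ≤ ·)) (j : Nat) (h : j < xs.length) :
    j + 1 ≤ xs.countP (fun y => decide (y ≤ xs[j])) := by
  have hmono : ∀ k, (hk : k < xs.length) → k ≤ j → xs[k] ≤ xs[j] := by
    intro k hk hkj
    rcases Nat.lt_or_eq_of_le hkj with hlt | hEq
    · exact List.pairwise_iff_getElem.1 hs k j hk h hlt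
    · subst hEq; exact le_refl _
  have hlen : (xs.take (j + 1)).length = j + 1 := by
    simp [List.length_take]; omega
  have htake : (xs.take (j + 1)).filter (fun y => decide (y ≤ xs[j])) = xs.take (j + 1) := by
    apply List.filter_eq_self.2
    intro a ha
    rcases List.mem_iff_getElem.1 ha with ⟨k, hk, rfl⟩
    have hk1 : k < j + 1 := by omega
    have hk2 : k < xs.length := by omega
    have : (xs.take (j + 1))[k] = xs[k] := List.getElem_take
    rw [this]
    exact decide_eq_true_iff.2 (hmono k hk2 (by omega))
  have hsub : List.Sublist ((xs.take (j + 1)).filter (fun y => decide (y ≤ xs[j])))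
      (xs.filter (fun y => decide (y ≤ xs[j]))) :=
    (List.take_sublist (j + 1) xs).filter _
  have := hsub.length_le
  rw [htake, hlen, List.countP_eq_length_filter] at *
  omega

-- in a nondecreasing list, if c = #{y ≤ i} > 0 then the element at index c-1 is ≤ i
lemma pv_countP_getElem_le (xs : List Int) (hs : xs.Pairwise (· ≤ ·)) (i : Int)
    (hpos : 0 < xs.countP (fun y => decide (y ≤ i))) :
    ∃ h : xs.countP (fun y => decide (y ≤ i)) - 1 < xs.length,
      xs[xs.countP (fun y => decide (y ≤ i)) - 1] ≤ i := by
  set c := xs.countP (fun y => decide (y ≤ i)) with hc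
  have hcle : c ≤ xs.length := List.countP_le_length
  have hlt : c - 1 < xs.length := by omega
  refine ⟨hlt, ?_⟩
  by_contra hgt
  rw [not_le] at hgt
  have hdrop0 : (xs.drop (c - 1)).countP (fun y => decide (y ≤ i)) = 0 := by
    apply List.countP_eq_zero.2
    intro a ha
    rcases List.mem_iff_getElem.1 ha with ⟨k, hk, rfl⟩
    have hk2 : c - 1 + k < xs.length := by
      simp [List.length_drop] at hk
      omega
    have hidx : (xs.drop (c - 1))[k] = xs[c - 1 + k] := List.getElem_drop ..
    rw [hidx]
    have hle : xs[c - 1] ≤ xs[c - 1 + k] := by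
      rcases Nat.eq_zero_or_pos k with rfl | hkpos
      · simp
      · exact List.pairwise_iff_getElem.1 hs (c - 1) (c - 1 + k) hlt hk2 (by omega)
    simp only [decide_eq_true_iff]
    omega
  have hsplit := List.take_append_drop (c - 1) xs
  have hcnt : c = (xs.take (c - 1)).countP (fun y => decide (y ≤ i))
      + (xs.drop (c - 1)).countP (fun y => decide (y ≤ i)) := by
    conv_lhs => rw [hc, ← hsplit]
    exact List.countP_append ..
  have htl : (xs.take (c - 1)).countP (fun y => decide (y ≤ i)) ≤ c - 1 := by
    have := List.countP_le_length (p := fun y => decide (y ≤ i)) (l := xs.take (c - 1))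
    simp [List.length_take] at this
    exact this.1
  omega

-- the capacity computed by A's range loop equals B's sorted-index maximum
lemma pv_mc_eq (N : Int) (L : List Int) (m0 : Int) (hm0 : 0 ≤ m0) :
    ((PySem.List.pyRange 1 (N + 1) 1).map
        (fun i => PySem.Int.floordiv (pvS (fun j => (L.count j : Int)) i + i - 1) i)).foldl max m0
    = (PySem.List.enumerate (pvXs N L) 0).foldl
        (fun m p => max m (PySem.Int.floordiv p.1 p.2 + 1)) m0 := by
  conv_rhs => rw [pv_foldl_max_map (PySem.List.enumerate (pvXs N L) 0)
    (fun p => PySem.Int.floordiv p.1 p.2 + 1) m0]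
  by_cases hN : N < 1
  · rw [PySem.List.pyRange_one_eq_nil (by omega), pvXs_nil N L hN]
    simp [PySem.List.enumerate]
  · rw [not_lt] at hN
    have hsorted := pvXs_sorted N L
    have hmem1 : ∀ x ∈ pvXs N L, 1 ≤ x ∧ x ≤ N := fun x hx => ((pvXs_mem N L x).1 hx).2
    apply le_antisymm
    · apply pv_foldl_max_le _ _ _ (pv_le_foldl_max_seed _ _)
      intro y hy
      rcases List.mem_map.1 hy with ⟨i, hi, rfl⟩
      obtain ⟨hi1, hi2⟩ := PySem.List.mem_pyRange_one.1 hi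
      rw [pv_pvS_eq N L i (by omega) (by omega)]
      rcases Nat.eq_zero_or_pos ((pvXs N L).countP (fun y => decide (y ≤ i))) with hc0 | hcpos
      · rw [hc0]
        rw [show (((0 : Nat) : Int) + i - 1) = 0 + i - 1 by push_cast; ring, pv_ceil_zero i hi1]
        exact le_trans hm0 (pv_le_foldl_max_seed _ _)
      · obtain ⟨hlt, hle⟩ := pv_countP_getElem_le (pvXs N L) hsorted i hcpos
        set c : Nat := (pvXs N L).countP (fun y => decide (y ≤ i)) with hcdef
        set x : Int := (pvXs N L)[c - 1] with hxdef
        have hx1 : 1 ≤ x := (hmem1 x (List.getElem_mem hlt)).1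
        have step1 : PySem.Int.floordiv ((c : Int) + i - 1) i
            ≤ PySem.Int.floordiv ((c : Int) + x - 1) x :=
          pv_ceil_mono _ _ _ (by positivity) hx1 hle
        have step2 : PySem.Int.floordiv ((c : Int) + x - 1) x
            = PySem.Int.floordiv (((c - 1 : Nat) : Int)) x + 1 := by
          rw [pv_floordiv_add_one _ _ hx1]
          congr 1
          push_cast [Nat.cast_sub hcpos]
          omega
        have hmemB : ((0 : Int) + ((c - 1 : Nat) : Int), x) ∈ PySem.List.enumerate (pvXs N L) 0 :=
          (PySem.List.mem_enumerate_iff _ _ _).2 ⟨c - 1, hlt, rfl⟩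
        have hfold := pv_le_foldl_max_mem
          ((PySem.List.enumerate (pvXs N L) 0).map
            (fun p => PySem.Int.floordiv p.1 p.2 + 1)) m0 _
          (List.mem_map.2 ⟨_, hmemB, rfl⟩)
        simp only [zero_add] at hfold
        calc PySem.Int.floordiv ((c : Int) + i - 1) i
            ≤ PySem.Int.floordiv (((c - 1 : Nat) : Int)) x + 1 := by rw [← step2]; exact step1
          _ ≤ _ := hfold
    · apply pv_foldl_max_le _ _ _ (pv_le_foldl_max_seed _ _)
      intro y hy
      rcases List.mem_map.1 hy with ⟨p, hp, rfl⟩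
      rcases (PySem.List.mem_enumerate_iff _ _ _).1 hp with ⟨k, hk, rfl⟩
      set x : Int := (pvXs N L)[k] with hxdef
      obtain ⟨hx1, hxN⟩ := hmem1 x (List.getElem_mem hk)
      have hcount := pv_idx_le_countP (pvXs N L) hsorted k hk
      have e1 : PySem.Int.floordiv ((0 : Int) + (k : Int)) x + 1
          = PySem.Int.floordiv (((k : Int) + 1) + x - 1) x := by
        rw [← pv_floordiv_add_one _ _ hx1]
        congr 2
        ring
      have e2 : PySem.Int.floordiv (((k : Int) + 1) + x - 1) x
          ≤ PySem.Int.floordiv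
              (((pvXs N L).countP (fun y => decide (y ≤ x)) : Int) + x - 1) x :=
        pv_ceil_mono_num _ _ _ hx1 (by exact_mod_cast hcount)
      rw [← pv_pvS_eq N L x (by omega) hxN] at e2
      have hmemA : x ∈ PySem.List.pyRange 1 (N + 1) 1 :=
        PySem.List.mem_pyRange_one.2 ⟨hx1, by omega⟩
      have hfold := pv_le_foldl_max_mem
        ((PySem.List.pyRange 1 (N + 1) 1).map
          (fun i => PySem.Int.floordiv (pvS (fun j => (L.count j : Int)) i + i - 1) i)) m0 _
        (List.mem_map.2 ⟨x, hmemA, rfl⟩)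
      calc PySem.Int.floordiv ((0 : Int) + (k : Int)) x + 1
          ≤ PySem.Int.floordiv (pvS (fun j => (L.count j : Int)) x + x - 1) x := by
            rw [e1]; exact e2
        _ ≤ _ := hfold

-- B's run loop computes pvPromSpec on a nondecreasing list
lemma pv_run_aux (mc : Int) (hmc : 0 ≤ mc) :
    ∀ (t : List Int) (p r prom : Int), 1 ≤ r → t.Pairwise (· ≤ ·) → (∀ y ∈ t, p ≤ y) →
    (t.foldl (pvRunStep mc) (some p, r, prom)).2.2
      = prom + (max 0 (r + (t.count p : Int) - mc) - max 0 (r - mc))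
        + pvPromSpec mc (t.filter (fun y => decide (y ≠ p))) := by
  intro t
  induction t with
  | nil =>
    intro p r prom _ _ _
    simp [pvPromSpec]
  | cons x t ih =>
    intro p r prom hr hpw hlb
    have hxall := (List.pairwise_cons.1 hpw).1
    have hpw' := (List.pairwise_cons.1 hpw).2
    by_cases hxp : x = p
    · subst hxp
      have hstep : pvRunStep mc (some x, r, prom) x
          = (some x, r + 1, if mc < r + 1 then prom + 1 else prom) := by
        simp [pvRunStep]
      rw [List.foldl_cons, hstep,
        ih x (r + 1) (if mc < r + 1 then prom + 1 else prom) (by omega) hpw' hxall]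
      have hcnt : ((x :: t).count x : Int) = (t.count x : Int) + 1 := by
        simp [List.count_cons_self]
      have hfil : (x :: t).filter (fun y => decide (y ≠ x)) = t.filter (fun y => decide (y ≠ x)) := by
        simp
      rw [hcnt, hfil]
      generalize pvPromSpec mc (t.filter (fun y => decide (y ≠ x))) = P
      split_ifs <;> omega
    · have hpx : p < x := lt_of_le_of_ne (hlb x (by simp)) (fun h => hxp h.symm)
      have hstep : pvRunStep mc (some p, r, prom) x
          = (some x, 1, if mc < 1 then prom + 1 else prom) := by
        simp [pvRunStep, hxp]
      have hpnot : p ∉ x :: t := by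
        intro hm
        rcases List.mem_cons.1 hm with hEq | hm'
        · omega
        · have := hxall p hm'; omega
      have hcnt0 : (x :: t).count p = 0 := List.count_eq_zero.2 hpnot
      have hfilp : (x :: t).filter (fun y => decide (y ≠ p)) = x :: t := by
        apply List.filter_eq_self.2
        intro a ha
        rcases List.mem_cons.1 ha with hEq | ha'
        · subst hEq; simp; omega
        · have := hxall a ha'; simp; omega
      rw [List.foldl_cons, hstep,
        ih x 1 (if mc < 1 then prom + 1 else prom) (by omega) hpw' hxall, hfilp, hcnt0]
      have hPS : pvPromSpec mc (x :: t)
          = max 0 (((x :: t).count x : Int) - mc)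
            + pvPromSpec mc (t.filter (fun y => decide (y ≠ x))) := by
        simp [pvPromSpec]
      rw [hPS]
      have hcnt : ((x :: t).count x : Int) = (t.count x : Int) + 1 := by
        simp [List.count_cons_self]
      rw [hcnt]
      generalize pvPromSpec mc (t.filter (fun y => decide (y ≠ x))) = P
      push_cast [hcnt0]
      split_ifs <;> omega

lemma pv_run_top (mc : Int) (hmc : 0 ≤ mc) (xs : List Int) (hs : xs.Pairwise (· ≤ ·)) :
    (xs.foldl (pvRunStep mc) (none, 0, 0)).2.2 = pvPromSpec mc xs := by
  cases xs with
  | nil => simp [pvPromSpec]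
  | cons x t =>
    have hxall := (List.pairwise_cons.1 hs).1
    have hpw' := (List.pairwise_cons.1 hs).2
    have hstep : pvRunStep mc ((none : Option Int), (0 : Int), (0 : Int)) x
        = (some x, 1, if mc < 1 then (0 : Int) + 1 else 0) := by
      simp [pvRunStep]
    rw [List.foldl_cons, hstep,
      pv_run_aux mc hmc t x 1 (if mc < 1 then (0 : Int) + 1 else 0) (by omega) hpw' hxall]
    have hPS : pvPromSpec mc (x :: t)
        = max 0 (((x :: t).count x : Int) - mc)
          + pvPromSpec mc (t.filter (fun y => decide (y ≠ x))) := by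
      simp [pvPromSpec]
    rw [hPS]
    have hcnt : ((x :: t).count x : Int) = (t.count x : Int) + 1 := by
      simp [List.count_cons_self]
    rw [hcnt]
    generalize pvPromSpec mc (t.filter (fun y => decide (y ≠ x))) = P
    split_ifs <;> omega

-- pvPromSpec as a sum over any duplicate-free list with the same members
lemma pv_promSpec_eq (mc : Int) (hmc : 0 ≤ mc) :
    ∀ (n : Nat) (ys D : List Int), ys.length ≤ n → D.Nodup → (∀ v, v ∈ D ↔ v ∈ ys) →
    pvPromSpec mc ys = (D.map (fun v => max 0 ((ys.count v : Int) - mc))).sum := by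
  intro n
  induction n with
  | zero =>
    intro ys D hlen hD hmem
    have hys : ys = [] := List.eq_nil_of_length_eq_zero (by omega)
    subst hys
    have hDnil : D = [] := List.eq_nil_iff_forall_not_mem.2 (fun v hv => by simp at hmem; exact hmem v hv)
    subst hDnil
    simp [pvPromSpec]
  | succ n ih =>
    intro ys D hlen hD hmem
    cases ys with
    | nil =>
      have hDnil : D = [] := List.eq_nil_iff_forall_not_mem.2 (fun v hv => by simp at hmem; exact hmem v hv)
      subst hDnil
      simp [pvPromSpec]
    | cons x t =>
      have hxD : x ∈ D := (hmem x).2 (by simp)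
      have hperm : D.Perm (x :: D.erase x) := List.perm_cons_erase hxD
      have hsum : (D.map (fun v => max 0 (((x :: t).count v : Int) - mc))).sum
          = max 0 (((x :: t).count x : Int) - mc)
            + ((D.erase x).map (fun v => max 0 (((x :: t).count v : Int) - mc))).sum := by
        rw [(hperm.map _).sum_eq]
        simp
      have hlen' : (t.filter (fun y => decide (y ≠ x))).length ≤ n := by
        have h1 := List.length_filter_le (fun y => decide (y ≠ x)) t
        simp at hlen
        omega
      have hD' : (D.erase x).Nodup := hD.erase x
      have hmem' : ∀ v, v ∈ D.erase x ↔ v ∈ t.filter (fun y => decide (y ≠ x)) := by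
        intro v
        rw [hD.mem_erase_iff, List.mem_filter, hmem v]
        simp
        constructor
        · rintro ⟨hvx, hv⟩
          rcases hv with rfl | hv
          · exact absurd rfl hvx
          · exact ⟨hv, hvx⟩
        · rintro ⟨hv, hvx⟩
          exact ⟨hvx, Or.inr hv⟩
      have hcongr : (D.erase x).map (fun v => max 0 (((t.filter (fun y => decide (y ≠ x))).count v : Int) - mc))
          = (D.erase x).map (fun v => max 0 (((x :: t).count v : Int) - mc)) := by
        apply List.map_congr_left
        intro v hv
        have hvx : v ≠ x := (hD.mem_erase_iff.1 hv).1
        have h1 : (t.filter (fun y => decide (y ≠ x))).count v = t.count v := by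
          rw [List.count_filter]
          simp [hvx]
        have h2 : (x :: t).count v = t.count v := by
          rw [List.count_cons]
          simp
          omega
        rw [h1, h2]
      have hPS : pvPromSpec mc (x :: t)
          = max 0 (((x :: t).count x : Int) - mc)
            + pvPromSpec mc (t.filter (fun y => decide (y ≠ x))) := by
        simp [pvPromSpec]
      rw [hPS, ih (t.filter (fun y => decide (y ≠ x))) (D.erase x) hlen' hD' hmem', hcongr, hsum]

-- A's promotion sum equals B's run loop
lemma pv_prom_eq (N : Int) (L : List Int) (mc : Int) (hmc : 0 ≤ mc) :
    (PySem.List.pyRange 1 (N + 1) 1).foldl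
      (fun p i => p + max 0 ((L.count i : Int) - mc)) 0
    = ((pvXs N L).foldl (pvRunStep mc) (none, 0, 0)).2.2 := by
  by_cases hN : N < 1
  · rw [PySem.List.pyRange_one_eq_nil (by omega), pvXs_nil N L hN]
    simp
  · rw [not_lt] at hN
    rw [PySem.List.foldl_add, pv_run_top mc hmc _ (pvXs_sorted N L), zero_add]
    have hvanish : ∀ i ∈ PySem.List.pyRange 1 (N + 1) 1,
        (fun i => decide (i ∈ pvXs N L)) i = false → max 0 ((L.count i : Int) - mc) = 0 := by
      intro i hi hfalse
      obtain ⟨hi1, hi2⟩ := PySem.List.mem_pyRange_one.1 hi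
      have hnot : i ∉ pvXs N L := by simpa using hfalse
      have : i ∉ L := fun hm => hnot ((pvXs_mem N L i).2 ⟨hm, hi1, by omega⟩)
      rw [List.count_eq_zero.2 this]
      simp
      omega
    rw [pv_sum_filter _ _ _ hvanish]
    set D := (PySem.List.pyRange 1 (N + 1) 1).filter (fun i => decide (i ∈ pvXs N L)) with hDdef
    have hD : D.Nodup := (PySem.List.nodup_pyRange_one _ _).filter _
    have hmemD : ∀ v, v ∈ D ↔ v ∈ pvXs N L := by
      intro v
      rw [hDdef, List.mem_filter]
      simp only [decide_eq_true_iff]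
      constructor
      · exact fun h => h.2
      · intro hv
        obtain ⟨_, hv1, hvN⟩ := (pvXs_mem N L v).1 hv
        exact ⟨PySem.List.mem_pyRange_one.2 ⟨hv1, by omega⟩, hv⟩
    rw [pv_promSpec_eq mc hmc (pvXs N L).length (pvXs N L) D le_rfl hD hmemD]
    apply congrArg List.sum
    apply List.map_congr_left
    intro v hv
    have hvx := (hmemD v).1 hv
    have hPv : (1 ≤ v ∧ v ≤ N) := ((pvXs_mem N L v).1 hvx).2
    have hc : (pvXs N L).count v = L.count v := by
      unfold pvXs
      rw [(PySem.List.sorted_perm _ _ _).count_eq, List.count_filter]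
      simp [hPv.1, hPv.2]
    rw [hc]

-- ===== VERDICT (by name: the statement is the Claim_ definition above) =====
theorem solve_spec : Claim_equal_solve := by
  intro N C G _ hpre
  obtain ⟨hN1, hG, _⟩ := hpre
  have hys : G.map (fun g => PySem.List.pyGetD g 1 0) ≠ [] := by simpa using hG
  have hm0 := pv_m0_nonneg _ hys
  unfold Spec_solve
  simp only [solve, solve_alt, if_neg hN1]
  simp only [PySem.Dict.getD_counter]
  set L := G.map (fun g => PySem.List.pyGetD g 0 0) with hL
  set m0 := pvMostCommonTopCount
    (PySem.Dict.counter (G.map (fun g => PySem.List.pyGetD g 1 0))) with hm0def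
  have hA : ((PySem.List.pyRange 1 (N + 1) 1).foldl
      (fun (s : Int × Int) i =>
        (s.1 + (L.count i : Int),
         max s.2 (PySem.Int.floordiv (s.1 + (L.count i : Int) + i - 1) i)))
      (0, m0)).2
      = (PySem.List.enumerate (pvXs N L) 0).foldl
          (fun m p => max m (PySem.Int.floordiv p.1 p.2 + 1)) m0 := by
    by_cases hN0 : 0 ≤ N
    · obtain ⟨n, rfl⟩ : ∃ n : Nat, N = (n : Int) :=
        ⟨N.toNat, (Int.toNat_of_nonneg hN0).symm⟩
      rw [pv_foldA (fun j => (L.count j : Int)) m0 n]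
      exact pv_mc_eq _ L m0 hm0
    · rw [PySem.List.pyRange_one_eq_nil (by omega), pvXs_nil N L (by omega)]
      simp
  have hmcB0 : 0 ≤ (PySem.List.enumerate (pvXs N L) 0).foldl
      (fun m p => max m (PySem.Int.floordiv p.1 p.2 + 1)) m0 := by
    rw [pv_foldl_max_map]
    exact le_trans hm0 (pv_le_foldl_max_seed _ _)
  rw [hA, pv_prom_eq N L _ hmcB0]
  rfl
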